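-- pv_equiv track=rewrite | github.com/naidaazizova/algosi | lab3/task3/src/task3.py | pugalo_sort
-- ===== SOURCE A (Python) =====
-- def pugalo_sort(A, n, k):
--     sorted_flag = False
--     while not sorted_flag:
--         sorted_flag = True
--         for i in range(0, n - k):
--             if A[i] > A[i + k]:
--                 A[i], A[i + k] = A[i + k], A[i]
--                 sorted_flag = False
--     return "ДА" if A == sorted(A) else "НЕТ"
-- ===== SOURCE B (Python) =====
-- def pugalo_sort(A, n, k):
--     if k >= 1:
--         m = min(max(n, 0), len(A))
--         for c in range(min(k, m)):
--             A[c:m:k] = sorted(A[c:m:k])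
--     return "ДА" if A == sorted(A) else "НЕТ"
-- ===== Notes on version B (the rewrite author's own statement) =====
-- stated objective: alternative
-- what changed: Replaces A's repeated gap-k bubble passes (looped until no swap) by sorting each residue-class-mod-k slice of the first min(n,len(A)) elements once via extended-slice assignment, then doing the same sorted-check.
-- outside the precondition, e.g. on pugalo_sort([-1, -2], 0, -1): A returns 'ДА', B returns 'НЕТ'; on pugalo_sort([2, 1], 1, -1): A does not finish within the time limit, B returns 'НЕТ'; on pugalo_sort([1, 2], 5, 3): A raises IndexError, B returns 'ДА'
import Mathlib
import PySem

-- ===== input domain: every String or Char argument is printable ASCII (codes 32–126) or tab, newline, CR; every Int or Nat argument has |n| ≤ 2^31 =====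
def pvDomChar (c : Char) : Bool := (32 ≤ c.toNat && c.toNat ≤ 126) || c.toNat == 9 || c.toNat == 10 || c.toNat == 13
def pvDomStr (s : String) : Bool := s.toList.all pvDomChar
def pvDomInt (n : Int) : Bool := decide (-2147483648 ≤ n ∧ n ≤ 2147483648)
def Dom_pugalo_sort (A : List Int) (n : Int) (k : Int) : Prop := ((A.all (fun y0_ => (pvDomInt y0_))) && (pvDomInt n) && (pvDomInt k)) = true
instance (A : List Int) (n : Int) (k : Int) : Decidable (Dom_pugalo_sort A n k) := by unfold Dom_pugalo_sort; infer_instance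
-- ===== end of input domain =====

-- B replaces A's repeated gap-k bubble passes by one sort of each residue-class-mod-k
-- subsequence (objective: alternative algorithm). Both Pythons mutate A in place; inside
-- Pre_ with k ≥ 1 they leave the list in the same final state, and the proved equivalence
-- is about the return value.

-- ===== PORT A =====
-- One body of A's inner for-loop: the state is (current list, sorted_flag).
-- The `i + g < length` test is only a totality guard: Python raises IndexError outside it,
-- and Pre_ keeps such inputs out.
def pvSwapStep (g : Nat) (st : List Int × Bool) (i : Nat) : List Int × Bool :=
  if i + g < st.1.length ∧ st.1.getD (i + g) 0 < st.1.getD i 0 then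
    ((st.1.set i (st.1.getD (i + g) 0)).set (i + g) (st.1.getD i 0), false)
  else st

-- One full `for i in range(0, n - k)` pass, starting with sorted_flag = True.
def pvPass (g m : Nat) (L : List Int) : List Int × Bool :=
  (List.range m).foldl (pvSwapStep g) (L, true)

-- Termination measure for A's while-loop: the number of permutations of L that are
-- lexicographically smaller than L (each non-clean pass strictly decreases it).
def pvMeasure (L : List Int) : Nat :=
  (L.permutations.filter (fun M => decide (M < L))).length

-- a[j] :: (a.set j x) is a permutation of x :: a  (helper for pv_swap_perm)
theorem pv_cons_set_perm (t : List Int) (j : Nat) (x : Int) (hj : j < t.length) :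
    (t.getD j 0 :: t.set j x).Perm (x :: t) := by
  induction t generalizing j with
  | nil => simp at hj
  | cons a t ih =>
    cases j with
    | zero => simpa using List.Perm.swap x a t
    | succ j =>
      simp only [List.getD_cons_succ, List.set_cons_succ]
      exact (List.Perm.swap a _ _).trans
        (((ih j (by simpa using hj)).cons a).trans (List.Perm.swap x a t))

-- Swapping two entries yields a permutation.
theorem pv_swap_perm (L : List Int) (i j : Nat) (hij : i < j) (hj : j < L.length) :
    ((L.set i (L.getD j 0)).set j (L.getD i 0)).Perm L := by
  induction L generalizing i j with
  | nil => simp at hj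
  | cons a t ih =>
    cases i with
    | zero =>
      obtain ⟨j', rfl⟩ : ∃ j', j = j' + 1 := ⟨j - 1, by omega⟩
      simpa using pv_cons_set_perm t j' a (by simpa using hj)
    | succ i =>
      obtain ⟨j', rfl⟩ : ∃ j', j = j' + 1 := ⟨j - 1, by omega⟩
      simpa using List.Perm.cons a (ih i j' (by omega) (by simpa using hj))

-- Writing a smaller value at position i (and anything later) makes the list lex-smaller.
theorem pv_lex_swap (L : List Int) (i j : Nat) (a b : Int) (hij : i < j)
    (hi : i < L.length) (hb : b < L.getD i 0) :
    (L.set i b).set j a < L := by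
  induction L generalizing i j with
  | nil => simp at hi
  | cons x t ih =>
    obtain ⟨j', rfl⟩ : ∃ j', j = j' + 1 := ⟨j - 1, by omega⟩
    cases i with
    | zero =>
      simp only [List.set_cons_zero, List.set_cons_succ]
      exact List.Lex.rel (by simpa using hb)
    | succ i =>
      simp only [List.set_cons_succ]
      exact List.Lex.cons (ih i j' (by omega) (by simpa using hi) (by simpa using hb))

-- countP is strictly monotone when the predicates are pointwise ordered with a strict witness.
theorem pv_countP_lt {α : Type} (l : List α) (p q : α → Bool)
    (h : ∀ x ∈ l, p x = true → q x = true) (a : α) (ha : a ∈ l)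
    (hq : q a = true) (hp : p a = false) : l.countP p < l.countP q := by
  induction l with
  | nil => simp at ha
  | cons y l ih =>
    simp only [List.countP_cons]
    rcases List.mem_cons.1 ha with rfl | ha
    · have hmono : l.countP p ≤ l.countP q :=
        List.countP_mono_left (fun x hx hpx => h x (List.mem_cons_of_mem _ hx) hpx)
      simp [hp, hq]; omega
    · have hlt := ih (fun x hx hpx => h x (List.mem_cons_of_mem _ hx) hpx) ha
      by_cases hy : p y = true
      · have := h y (List.mem_cons_self) hy
        simp [hy, this]; omega
      · simp only [Bool.not_eq_true] at hy
        simp [hy]; split <;> omega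

theorem pv_measure_lt (L' L : List Int) (hperm : L'.Perm L) (hlt : L' < L) :
    pvMeasure L' < pvMeasure L := by
  unfold pvMeasure
  rw [← List.countP_eq_length_filter, ← List.countP_eq_length_filter]
  have h1 : L'.permutations.countP (fun M => decide (M < L')) =
      L.permutations.countP (fun M => decide (M < L')) :=
    List.Perm.countP_congr (hperm.permutations) (fun x _ => rfl)
  rw [h1]
  exact pv_countP_lt L.permutations _ _
    (fun x _ hx => decide_eq_true (lt_trans (of_decide_eq_true hx) hlt))
    L' (List.mem_permutations.2 hperm) (decide_eq_true hlt)
    (decide_eq_false (lt_irrefl L'))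

-- The invariant carried through one pass, relative to the pass's input L.
def pvInv (L : List Int) (st : List Int × Bool) : Prop :=
  (st.2 = true → st.1 = L) ∧ (st.2 = false → st.1.Perm L ∧ st.1 < L)

theorem pv_step_inv (g : Nat) (L : List Int) (st : List Int × Bool) (i : Nat)
    (hst : pvInv L st) : pvInv L (pvSwapStep g st i) := by
  unfold pvSwapStep
  split
  · next hcond =>
    have hg : 0 < g := by
      rcases Nat.eq_zero_or_pos g with rfl | hg
      · have hx : st.1.getD i 0 < st.1.getD i 0 := by simpa using hcond.2
        exact absurd hx (lt_irrefl _)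
      · exact hg
    have hperm := pv_swap_perm st.1 i (i + g) (by omega) hcond.1
    have hlex := pv_lex_swap st.1 i (i + g) (st.1.getD i 0) (st.1.getD (i + g) 0)
      (by omega) (by omega) hcond.2
    refine ⟨fun h => by simp at h, fun _ => ?_⟩
    cases h2 : st.2 with
    | true => rw [hst.1 h2] at hperm hlex ⊢; exact ⟨hperm, hlex⟩
    | false =>
      obtain ⟨hp, hl⟩ := hst.2 h2
      exact ⟨hperm.trans hp, lt_trans hlex hl⟩
  · exact hst

theorem pv_foldl_inv (g : Nat) (L : List Int) :
    ∀ (l : List Nat) (st : List Int × Bool), pvInv L st →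
      pvInv L (l.foldl (pvSwapStep g) st) := by
  intro l
  induction l with
  | nil => intro st h; exact h
  | cons i l ih => intro st h; exact ih _ (pv_step_inv g L st i h)

-- A pass either reports True and returns the list unchanged, or returns a
-- lex-smaller permutation together with False.
theorem pv_pass_rel (g m : Nat) (L : List Int) :
    ((pvPass g m L).2 = true → pvPass g m L = (L, true)) ∧
    ((pvPass g m L).2 = false → (pvPass g m L).1.Perm L ∧ (pvPass g m L).1 < L) := by
  have hinv : pvInv L (pvPass g m L) :=
    pv_foldl_inv g L (List.range m) (L, true) ⟨fun _ => rfl, fun h => by simp at h⟩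
  refine ⟨fun h2 => ?_, hinv.2⟩
  have h1 := hinv.1 h2
  cases hp : pvPass g m L with
  | mk a b => rw [hp] at h1 h2; simp at h1 h2; simp [h1, h2]

theorem pv_pass_decreases (g m : Nat) (L : List Int) (h : (pvPass g m L).2 = false) :
    pvMeasure (pvPass g m L).1 < pvMeasure L :=
  pv_measure_lt _ _ ((pv_pass_rel g m L).2 h).1 ((pv_pass_rel g m L).2 h).2

-- A's while-loop: repeat passes until sorted_flag stays True.
def pvLoop (g m : Nat) (L : List Int) : List Int :=
  if hfl : (pvPass g m L).2 = true then (pvPass g m L).1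
  else pvLoop g m (pvPass g m L).1
termination_by pvMeasure L
decreasing_by exact pv_pass_decreases g m L (by simpa using hfl)

def pugalo_sort (A : List Int) (n : Int) (k : Int) : String :=
  let F := pvLoop k.toNat (n - k).toNat A
  if F = PySem.List.sorted F (fun x => x) false then "ДА" else "НЕТ"

-- ===== PORT B =====
-- Hand-port of the extended slice read A[c:m:g] (g = s+1 ≥ 1, m ≤ len(A)): exact there.
def pvGather (L : List Int) (s c m : Nat) : List Int :=
  if c < m then L.getD c 0 :: pvGather L s (c + (s + 1)) m else []
termination_by m - c
decreasing_by omega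

-- Hand-port of the extended slice write A[c:m:g] = vs (len(vs) = len(A[c:m:g])): exact there.
def pvScatter (L : List Int) (s c : Nat) : List Int → List Int
  | [] => L
  | v :: vs => pvScatter (L.set c v) s (c + (s + 1)) vs

def pugalo_sort_alt (A : List Int) (n : Int) (k : Int) : String :=
  let A' := if 1 ≤ k then
      let m := min (max n 0).toNat A.length
      let g := k.toNat
      (List.range (min g m)).foldl
        (fun L c => pvScatter L (g - 1) c
          (PySem.List.sorted (pvGather L (g - 1) c m) (fun x => x) false)) A
    else A
  if A' = PySem.List.sorted A' (fun x => x) false then "ДА" else "НЕТ"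

-- ===== PRECONDITION & SPEC =====
-- Pre_ excludes k < 0 with k < n (A diverges, raises IndexError, or its value depends on
-- Python's negative-index wraparound) and n > len(A) with k < n (IndexError).
def Pre_pugalo_sort (A : List Int) (n : Int) (k : Int) : Prop :=
  n ≤ k ∨ (0 ≤ k ∧ n ≤ (A.length : Int))
instance (A : List Int) (n : Int) (k : Int) : Decidable (Pre_pugalo_sort A n k) := by
  unfold Pre_pugalo_sort; infer_instance

def pvWitness_pugalo_sort : List Int × Int × Int := ([3, 1, 2, 5, 4], 5, 2)

def Spec_pugalo_sort (A : List Int) (n : Int) (k : Int) (out : String) : Prop := out = pugalo_sort_alt A n k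
instance (A : List Int) (n : Int) (k : Int) (out : String) : Decidable (Spec_pugalo_sort A n k out) := by unfold Spec_pugalo_sort; infer_instance

-- ===== CLAIM (what is proved, stated in full; the proofs are below) =====
def Claim_equal_pugalo_sort : Prop := ∀ (A : List Int) (n : Int) (k : Int), Dom_pugalo_sort A n k → Pre_pugalo_sort A n k → Spec_pugalo_sort A n k (pugalo_sort A n k)

-- ===== LEMMAS AND PROOFS =====

-- getD after set, in closed form.
theorem pv_getD_set (L : List Int) (q p : Nat) (v : Int) :
    (L.set q v).getD p 0 = if p = q ∧ p < L.length then v else L.getD p 0 := by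
  induction L generalizing p q with
  | nil => simp
  | cons a t ih =>
    cases q with
    | zero => cases p <;> simp
    | succ q =>
      cases p with
      | zero => simp
      | succ p => simpa using ih q p

-- one-step unfolding of pvGather
theorem pvGather_eq (L : List Int) (s c m : Nat) :
    pvGather L s c m = if c < m then L.getD c 0 :: pvGather L s (c + (s + 1)) m else [] := by
  rw [pvGather]

-- entry j of the gathered subsequence exists iff its source position is below m
theorem pv_gather_lt_length (L : List Int) (s m : Nat) :
    ∀ (j c : Nat), j < (pvGather L s c m).length ↔ c + j * (s + 1) < m := by
  intro j
  induction j with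
  | zero =>
    intro c; rw [pvGather_eq L s c m]
    split <;> simp_all
  | succ j ih =>
    intro c; rw [pvGather_eq L s c m]
    have e : c + (s + 1) + j * (s + 1) = c + (j + 1) * (s + 1) := by ring
    split
    · next h =>
      simp only [List.length_cons]
      rw [Nat.succ_lt_succ_iff, ih (c + (s + 1)), e]
    · next h =>
      simp only [List.length_nil]
      constructor
      · omega
      · intro hx; exact absurd (by omega : c < m) h

-- entry j of the gathered subsequence is the source entry at position c + j*(s+1)
theorem pv_gather_getD (L : List Int) (s m : Nat) :
    ∀ (j c : Nat), c + j * (s + 1) < m →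
      (pvGather L s c m).getD j 0 = L.getD (c + j * (s + 1)) 0 := by
  intro j
  induction j with
  | zero =>
    intro c hc; rw [pvGather_eq L s c m, if_pos (by omega)]; simp
  | succ j ih =>
    intro c hc
    have e : c + (s + 1) + j * (s + 1) = c + (j + 1) * (s + 1) := by ring
    rw [pvGather_eq L s c m, if_pos (by omega)]
    simp only [List.getD_cons_succ]
    rw [ih (c + (s + 1)) (by omega), e]

-- gather only reads the chain positions
theorem pv_gather_congr (L1 L2 : List Int) (s m : Nat) :
    ∀ (c : Nat), (∀ j, c + j * (s + 1) < m → L1.getD (c + j * (s + 1)) 0 = L2.getD (c + j * (s + 1)) 0) →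
      pvGather L1 s c m = pvGather L2 s c m := by
  suffices H : ∀ (fuel c : Nat), m - c ≤ fuel →
      (∀ j, c + j * (s + 1) < m → L1.getD (c + j * (s + 1)) 0 = L2.getD (c + j * (s + 1)) 0) →
      pvGather L1 s c m = pvGather L2 s c m by
    exact fun c => H (m - c) c le_rfl
  intro fuel
  induction fuel with
  | zero =>
    intro c hf _
    rw [pvGather_eq L1 s c m, pvGather_eq L2 s c m, if_neg (by omega), if_neg (by omega)]
  | succ fuel ih =>
    intro c hf h
    rw [pvGather_eq L1 s c m, pvGather_eq L2 s c m]
    by_cases hc : c < m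
    · rw [if_pos hc, if_pos hc]
      have h0 := h 0 (by simpa using hc)
      simp only [Nat.zero_mul, Nat.add_zero] at h0
      rw [h0, ih (c + (s + 1)) (by omega) (fun j hj => by
        have e : c + (s + 1) + j * (s + 1) = c + (j + 1) * (s + 1) := by ring
        rw [e]; exact h (j + 1) (by omega))]
    · rw [if_neg hc, if_neg hc]

-- how gather reacts to a single set (m within bounds)
theorem pv_gather_set (L : List Int) (s m : Nat) (hm : m ≤ L.length) (p : Nat) (v : Int) :
    ∀ (c : Nat), pvGather (L.set p v) s c m =
      if c ≤ p ∧ p < m ∧ (s + 1) ∣ (p - c) then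
        (pvGather L s c m).set ((p - c) / (s + 1)) v
      else pvGather L s c m := by
  suffices H : ∀ (fuel c : Nat), m - c ≤ fuel →
      pvGather (L.set p v) s c m =
        if c ≤ p ∧ p < m ∧ (s + 1) ∣ (p - c) then
          (pvGather L s c m).set ((p - c) / (s + 1)) v
        else pvGather L s c m by
    exact fun c => H (m - c) c le_rfl
  intro fuel
  induction fuel with
  | zero =>
    intro c hf
    rw [pvGather_eq (L.set p v) s c m, pvGather_eq L s c m,
      if_neg (by omega), if_neg (by omega), if_neg (fun hx => by omega)]
  | succ fuel ih =>
    intro c hf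
    rw [pvGather_eq (L.set p v) s c m, pvGather_eq L s c m]
    by_cases hc : c < m
    · rw [if_pos hc, if_pos hc]
      rw [ih (c + (s + 1)) (by omega)]
      by_cases hpc : p = c
      · subst hpc
        rw [if_neg (by omega), if_pos ⟨le_rfl, hc, by simp⟩]
        rw [pv_getD_set, if_pos ⟨rfl, by omega⟩]
        simp
      · rw [pv_getD_set, if_neg (by rintro ⟨h1, -⟩; exact hpc h1.symm)]
        by_cases houter : c ≤ p ∧ p < m ∧ (s + 1) ∣ (p - c)
        · obtain ⟨h1, h2, t, ht⟩ := houter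
          have htpos : 0 < t := by
            rcases Nat.eq_zero_or_pos t with rfl | h
            · omega
            · exact h
          obtain ⟨t', rfl⟩ : ∃ t', t = t' + 1 := ⟨t - 1, by omega⟩
          have hmul : (s + 1) * (t' + 1) = (s + 1) * t' + (s + 1) := by ring
          have hinner : c + (s + 1) ≤ p ∧ p < m ∧ (s + 1) ∣ (p - (c + (s + 1))) :=
            ⟨by omega, h2, ⟨t', by omega⟩⟩
          rw [if_pos hinner, if_pos ⟨h1, h2, ⟨t' + 1, ht⟩⟩]
          have e1 : (p - c) / (s + 1) = t' + 1 := by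
            rw [ht, Nat.mul_div_cancel_left _ (by omega)]
          have e2 : (p - (c + (s + 1))) / (s + 1) = t' := by
            have e : p - (c + (s + 1)) = (s + 1) * t' := by omega
            rw [e, Nat.mul_div_cancel_left _ (by omega)]
          rw [e1, e2, List.set_cons_succ]
        · rw [if_neg houter, if_neg (fun hinner => houter ?_)]
          obtain ⟨h1, h2, t, ht⟩ := hinner
          have hmul : (s + 1) * (t + 1) = (s + 1) * t + (s + 1) := by ring
          exact ⟨by omega, h2, ⟨t + 1, by omega⟩⟩
    · rw [if_neg hc, if_neg hc, if_neg (fun hx => by omega)]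

theorem pv_scatter_length (s : Nat) :
    ∀ (vs : List Int) (L : List Int) (c : Nat), (pvScatter L s c vs).length = L.length := by
  intro vs
  induction vs with
  | nil => intro L c; rfl
  | cons v vs ih => intro L c; rw [pvScatter, ih]; simp

theorem pv_scatter_getD_lt (s : Nat) :
    ∀ (vs : List Int) (L : List Int) (c p : Nat), p < c →
      (pvScatter L s c vs).getD p 0 = L.getD p 0 := by
  intro vs
  induction vs with
  | nil => intro L c p _; rfl
  | cons v vs ih =>
    intro L c p hp
    rw [pvScatter, ih _ _ _ (by omega), pv_getD_set, if_neg (by omega)]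

theorem pv_scatter_getD_hit (s : Nat) :
    ∀ (vs : List Int) (L : List Int) (c j : Nat), j < vs.length → c + j * (s + 1) < L.length →
      (pvScatter L s c vs).getD (c + j * (s + 1)) 0 = vs.getD j 0 := by
  intro vs
  induction vs with
  | nil => intro L c j hj _; simp at hj
  | cons v vs ih =>
    intro L c j hj hlen
    rw [pvScatter]
    cases j with
    | zero =>
      simp only [Nat.zero_mul, Nat.add_zero] at hlen ⊢
      rw [pv_scatter_getD_lt s vs _ _ _ (by omega), pv_getD_set,
        if_pos ⟨rfl, by simpa using hlen⟩]
      simp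
    | succ j =>
      have e : c + (j + 1) * (s + 1) = (c + (s + 1)) + j * (s + 1) := by ring
      rw [e]
      rw [ih _ _ j (by simpa using hj) (by simp; omega)]
      simp

theorem pv_scatter_getD_miss (s : Nat) :
    ∀ (vs : List Int) (L : List Int) (c p : Nat),
      (∀ j, j < vs.length → p ≠ c + j * (s + 1)) →
      (pvScatter L s c vs).getD p 0 = L.getD p 0 := by
  intro vs
  induction vs with
  | nil => intro L c p _; rfl
  | cons v vs ih =>
    intro L c p hp
    rw [pvScatter, ih _ _ _ (fun j hj => by
      have := hp (j + 1) (by simpa using hj)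
      intro hx; apply this; rw [hx]; ring)]
    rw [pv_getD_set, if_neg (by
      rintro ⟨rfl, -⟩
      exact hp 0 (by simp) (by simp))]

-- swapping the out-of-order pair (i, i+(s+1)) permutes every gathered class
theorem pv_swap_gather (L : List Int) (s m : Nat) (hm : m ≤ L.length) (i : Nat)
    (hi : i + (s + 1) < m) (c : Nat) (hc : c < s + 1) :
    (pvGather ((L.set i (L.getD (i + (s + 1)) 0)).set (i + (s + 1)) (L.getD i 0)) s c m).Perm
      (pvGather L s c m) := by
  have hlen2 : m ≤ (L.set i (L.getD (i + (s + 1)) 0)).length := by simpa using hm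
  rw [pv_gather_set _ s m hlen2 _ _ c, pv_gather_set L s m hm _ _ c]
  by_cases hcc : c = i % (s + 1)
  · subst hcc
    have hmd := Nat.mod_add_div i (s + 1)
    have hci : i % (s + 1) ≤ i := Nat.mod_le _ _
    have hmul : (s + 1) * (i / (s + 1) + 1) = (s + 1) * (i / (s + 1)) + (s + 1) := by ring
    have hd1 : (s + 1) ∣ (i - i % (s + 1)) := ⟨i / (s + 1), by omega⟩
    have hd2 : (s + 1) ∣ (i + (s + 1) - i % (s + 1)) := ⟨i / (s + 1) + 1, by omega⟩
    rw [if_pos ⟨by omega, hi, hd2⟩, if_pos ⟨hci, by omega, hd1⟩]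
    have e1 : (i - i % (s + 1)) / (s + 1) = i / (s + 1) := by
      have e : i - i % (s + 1) = (s + 1) * (i / (s + 1)) := by omega
      rw [e, Nat.mul_div_cancel_left _ (by omega)]
    have e2 : (i + (s + 1) - i % (s + 1)) / (s + 1) = i / (s + 1) + 1 := by
      have e : i + (s + 1) - i % (s + 1) = (s + 1) * (i / (s + 1) + 1) := by omega
      rw [e, Nat.mul_div_cancel_left _ (by omega)]
    rw [e1, e2]
    have hjg : i % (s + 1) + (i / (s + 1)) * (s + 1) = i := by
      have e : (i / (s + 1)) * (s + 1) = (s + 1) * (i / (s + 1)) := by ring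
      omega
    have hjg2 : i % (s + 1) + (i / (s + 1) + 1) * (s + 1) = i + (s + 1) := by
      have e : (i / (s + 1) + 1) * (s + 1) = (s + 1) * (i / (s + 1) + 1) := by ring
      omega
    have hv1 : L.getD i 0 = (pvGather L s (i % (s + 1)) m).getD (i / (s + 1)) 0 := by
      rw [pv_gather_getD L s m (i / (s + 1)) (i % (s + 1)) (by omega), hjg]
    have hv2 : L.getD (i + (s + 1)) 0 = (pvGather L s (i % (s + 1)) m).getD (i / (s + 1) + 1) 0 := by
      rw [pv_gather_getD L s m (i / (s + 1) + 1) (i % (s + 1)) (by omega), hjg2]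
    rw [hv1, hv2]
    exact pv_swap_perm (pvGather L s (i % (s + 1)) m) (i / (s + 1)) (i / (s + 1) + 1)
      (by omega) ((pv_gather_lt_length L s m (i / (s + 1) + 1) (i % (s + 1))).2 (by omega))
  · have hnd1 : ¬ (c ≤ i ∧ i < m ∧ (s + 1) ∣ (i - c)) := by
      rintro ⟨h1, -, t, ht⟩
      apply hcc
      have : i = c + (s + 1) * t := by omega
      subst this
      rw [Nat.add_mul_mod_self_left, Nat.mod_eq_of_lt hc]
    have hnd2 : ¬ (c ≤ i + (s + 1) ∧ i + (s + 1) < m ∧ (s + 1) ∣ (i + (s + 1) - c)) := by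
      rintro ⟨h1, -, t, ht⟩
      apply hcc
      have htpos : 0 < t := by
        rcases Nat.eq_zero_or_pos t with rfl | h
        · omega
        · exact h
      obtain ⟨t', rfl⟩ : ∃ t', t = t' + 1 := ⟨t - 1, by omega⟩
      have hmul : (s + 1) * (t' + 1) = (s + 1) * t' + (s + 1) := by ring
      have : i = c + (s + 1) * t' := by omega
      subst this
      rw [Nat.add_mul_mod_self_left, Nat.mod_eq_of_lt hc]
    rw [if_neg hnd1, if_neg hnd2]

-- the invariant carried from A's input list through passes and the whole loop
def pvInv2 (s m : Nat) (L M : List Int) : Prop :=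
  M.length = L.length ∧ (∀ p, m ≤ p → M.getD p 0 = L.getD p 0) ∧
  (∀ c, c < s + 1 → (pvGather M s c m).Perm (pvGather L s c m))

theorem pvInv2_refl (s m : Nat) (L : List Int) : pvInv2 s m L L :=
  ⟨rfl, fun _ _ => rfl, fun _ _ => List.Perm.refl _⟩

theorem pvInv2_trans (s m : Nat) (L M N : List Int)
    (h1 : pvInv2 s m L M) (h2 : pvInv2 s m M N) : pvInv2 s m L N :=
  ⟨h2.1.trans h1.1, fun p hp => (h2.2.1 p hp).trans (h1.2.1 p hp),
    fun c hc => (h2.2.2 c hc).trans (h1.2.2 c hc)⟩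

theorem pv_step_inv2 (s m : Nat) (L : List Int) (hm : m ≤ L.length)
    (st : List Int × Bool) (i : Nat) (hi : i + (s + 1) < m)
    (hst : pvInv2 s m L st.1) : pvInv2 s m L (pvSwapStep (s + 1) st i).1 := by
  unfold pvSwapStep
  split
  · next hcond =>
    have hmst : m ≤ st.1.length := by rw [hst.1]; exact hm
    refine pvInv2_trans s m L st.1 _ hst ⟨by simp, fun p hp => ?_, fun c hc => ?_⟩
    · rw [pv_getD_set, if_neg (by omega), pv_getD_set, if_neg (by omega)]
    · exact pv_swap_gather st.1 s m hmst i hi c hc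
  · exact hst

theorem pv_foldl_inv2 (s m : Nat) (L : List Int) (hm : m ≤ L.length) :
    ∀ (l : List Nat), (∀ i ∈ l, i + (s + 1) < m) →
      ∀ (st : List Int × Bool), pvInv2 s m L st.1 →
        pvInv2 s m L ((l.foldl (pvSwapStep (s + 1)) st).1) := by
  intro l
  induction l with
  | nil => intro _ st h; exact h
  | cons i l ih =>
    intro hmem st h
    exact ih (fun j hj => hmem j (List.mem_cons_of_mem _ hj)) _
      (pv_step_inv2 s m L hm st i (hmem i List.mem_cons_self) h)

theorem pv_pass_inv2 (s m : Nat) (L : List Int) (hm : m ≤ L.length) :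
    pvInv2 s m L (pvPass (s + 1) (m - (s + 1)) L).1 :=
  pv_foldl_inv2 s m L hm (List.range (m - (s + 1)))
    (fun i hi => by have := List.mem_range.1 hi; omega) (L, true) (pvInv2_refl s m L)

-- a pass that reports True found no out-of-order pair
theorem pv_step_flag (g : Nat) (st : List Int × Bool) (i : Nat)
    (h : (pvSwapStep g st i).2 = true) : st.2 = true ∧ pvSwapStep g st i = st := by
  unfold pvSwapStep at h ⊢
  split at h
  · simp at h
  · next hc => rw [if_neg hc]; exact ⟨h, rfl⟩

theorem pv_pass_fix (g : Nat) (L : List Int) :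
    ∀ (m : Nat), (pvPass g m L).2 = true →
      ∀ i, i < m → ¬(i + g < L.length ∧ L.getD (i + g) 0 < L.getD i 0) := by
  intro m
  induction m with
  | zero => intro _ i hi; omega
  | succ m ih =>
    intro h i hi
    have hsplit : pvPass g (m + 1) L = pvSwapStep g (pvPass g m L) m := by
      unfold pvPass; rw [List.range_succ, List.foldl_append]; simp
    rw [hsplit] at h
    obtain ⟨hflag, hsame⟩ := pv_step_flag g _ m h
    have hLm : pvPass g m L = (L, true) := (pv_pass_rel g m L).1 hflag
    rcases Nat.lt_succ_iff_lt_or_eq.1 hi with hlt | rfl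
    · exact ih hflag i hlt
    · rw [hLm] at h
      unfold pvSwapStep at h
      split at h
      · simp at h
      · next hc => simpa using hc

-- the whole loop: keeps the invariant, and its pass of the result reports True
theorem pvLoop_props (s m : Nat) (L : List Int) (hm : m ≤ L.length) :
    pvInv2 s m L (pvLoop (s + 1) (m - (s + 1)) L) ∧
    (pvPass (s + 1) (m - (s + 1)) (pvLoop (s + 1) (m - (s + 1)) L)).2 = true := by
  suffices H : ∀ (fuel : Nat) (L : List Int), pvMeasure L ≤ fuel → m ≤ L.length →
      pvInv2 s m L (pvLoop (s + 1) (m - (s + 1)) L) ∧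
      (pvPass (s + 1) (m - (s + 1)) (pvLoop (s + 1) (m - (s + 1)) L)).2 = true by
    exact H (pvMeasure L) L le_rfl hm
  intro fuel
  induction fuel with
  | zero =>
    intro L hf hm'
    rw [pvLoop]
    split
    · next hfl =>
      have hq : pvPass (s + 1) (m - (s + 1)) L = (L, true) := (pv_pass_rel _ _ L).1 hfl
      simp only [hq]
      exact ⟨pvInv2_refl _ _ _, trivial⟩
    · next hfl =>
      have hdec := pv_pass_decreases (s + 1) (m - (s + 1)) L (by simpa using hfl)
      omega
  | succ fuel ih =>
    intro L hf hm'
    rw [pvLoop]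
    split
    · next hfl =>
      have hq : pvPass (s + 1) (m - (s + 1)) L = (L, true) := (pv_pass_rel _ _ L).1 hfl
      simp only [hq]
      exact ⟨pvInv2_refl _ _ _, trivial⟩
    · next hfl =>
      have hfl' : (pvPass (s + 1) (m - (s + 1)) L).2 = false := by simpa using hfl
      have hdec := pv_pass_decreases (s + 1) (m - (s + 1)) L hfl'
      have hinvp := pv_pass_inv2 s m L hm'
      have hlen' : m ≤ (pvPass (s + 1) (m - (s + 1)) L).1.length := by
        rw [hinvp.1]; exact hm'
      obtain ⟨hinv, hfix⟩ := ih _ (by omega) hlen'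
      exact ⟨pvInv2_trans _ _ _ _ _ hinvp hinv, hfix⟩

-- characterization of B's fold over the classes
theorem pv_bfold (s m : Nat) (A : List Int) (hm : m ≤ A.length) :
    ∀ (t : Nat), t ≤ min (s + 1) m →
      ((List.range t).foldl (fun L c => pvScatter L s c
          (PySem.List.sorted (pvGather L s c m) (fun x => x) false)) A).length = A.length ∧
      ∀ p, p < A.length →
        ((List.range t).foldl (fun L c => pvScatter L s c
            (PySem.List.sorted (pvGather L s c m) (fun x => x) false)) A).getD p 0 =
          if p < m ∧ p % (s + 1) < t then
            (PySem.List.sorted (pvGather A s (p % (s + 1)) m) (fun x => x) false).getD (p / (s + 1)) 0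
          else A.getD p 0 := by
  intro t
  induction t with
  | zero =>
    intro _
    refine ⟨by simp, fun p hp => ?_⟩
    simp
  | succ t ih =>
    intro ht
    obtain ⟨ihlen, ihchar⟩ := ih (by omega)
    have hts : t < s + 1 := by omega
    rw [List.range_succ, List.foldl_append, List.foldl_cons, List.foldl_nil]
    set St := (List.range t).foldl (fun L c => pvScatter L s c
      (PySem.List.sorted (pvGather L s c m) (fun x => x) false)) A with hSt
    have hgather : pvGather St s t m = pvGather A s t m := by
      apply pv_gather_congr
      intro j hj
      rw [ihchar (t + j * (s + 1)) (by omega)]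
      rw [if_neg (by
        rintro ⟨-, h2⟩
        rw [Nat.add_mul_mod_self_right, Nat.mod_eq_of_lt hts] at h2
        omega)]
    refine ⟨by rw [pv_scatter_length, ihlen], fun p hp => ?_⟩
    by_cases hcase : p < m ∧ p % (s + 1) = t
    · obtain ⟨hpm, hpt⟩ := hcase
      have hmd := Nat.mod_add_div p (s + 1)
      have hpj : p = t + (p / (s + 1)) * (s + 1) := by
        have e : (p / (s + 1)) * (s + 1) = (s + 1) * (p / (s + 1)) := by ring
        omega
      have hjlen : p / (s + 1) <
          (PySem.List.sorted (pvGather St s t m) (fun x => x) false).length := by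
        rw [PySem.List.length_sorted, pv_gather_lt_length St s m]
        omega
      conv_lhs => rw [hpj]
      rw [pv_scatter_getD_hit s _ St t (p / (s + 1)) hjlen (by rw [ihlen]; omega)]
      rw [hgather, if_pos ⟨hpm, by omega⟩, hpt]
    · have hmiss : ∀ j, j < (PySem.List.sorted (pvGather St s t m) (fun x => x) false).length →
          p ≠ t + j * (s + 1) := by
        intro j hj hx
        rw [PySem.List.length_sorted, pv_gather_lt_length St s m] at hj
        apply hcase
        subst hx
        rw [Nat.add_mul_mod_self_right, Nat.mod_eq_of_lt hts]
        exact ⟨by omega, rfl⟩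
      rw [pv_scatter_getD_miss s _ St t p hmiss, ihchar p hp]
      have hiff : (p < m ∧ p % (s + 1) < t + 1) ↔ (p < m ∧ p % (s + 1) < t) := by
        constructor
        · rintro ⟨h1, h2⟩
          refine ⟨h1, ?_⟩
          rcases Nat.lt_succ_iff_lt_or_eq.1 h2 with h | h
          · exact h
          · exact absurd ⟨h1, h⟩ hcase
        · exact fun ⟨h1, h2⟩ => ⟨h1, by omega⟩
      rw [if_congr hiff rfl rfl]

theorem pv_main (s m : Nat) (A : List Int) (hm : m ≤ A.length) :
    pvLoop (s + 1) (m - (s + 1)) A =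
      (List.range (min (s + 1) m)).foldl
        (fun L c => pvScatter L s c
          (PySem.List.sorted (pvGather L s c m) (fun x => x) false)) A := by
  obtain ⟨hinv, hfix⟩ := pvLoop_props s m A hm
  set F := pvLoop (s + 1) (m - (s + 1)) A with hF
  have hlenF : F.length = A.length := hinv.1
  have hchain : ∀ i, i + (s + 1) < m → F.getD i 0 ≤ F.getD (i + (s + 1)) 0 := by
    intro i hi
    have hnc := pv_pass_fix (s + 1) F (m - (s + 1)) hfix i (by omega)
    by_contra hlt
    exact hnc ⟨by omega, by omega⟩
  have hsorted_class : ∀ c, c < s + 1 →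
      pvGather F s c m = PySem.List.sorted (pvGather A s c m) (fun x => x) false := by
    intro c hc
    refine Eq.symm (PySem.List.sorted_id_eq_of_perm_of_pairwise _ _ (hinv.2.2 c hc) ?_)
    rw [← List.isChain_iff_pairwise]
    apply List.isChain_iff_getElem.2
    intro i hilen
    have hi1 : c + (i + 1) * (s + 1) < m := (pv_gather_lt_length F s m (i + 1) c).1 hilen
    have hi0 : c + i * (s + 1) < m := by
      have e : (i + 1) * (s + 1) = i * (s + 1) + (s + 1) := by ring
      omega
    have e : c + (i + 1) * (s + 1) = (c + i * (s + 1)) + (s + 1) := by ring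
    rw [← List.getD_eq_getElem _ 0 (by omega), ← List.getD_eq_getElem _ 0 hilen]
    rw [pv_gather_getD F s m i c hi0, pv_gather_getD F s m (i + 1) c hi1, e]
    exact hchain _ (by omega)
  obtain ⟨hblen, hbchar⟩ := pv_bfold s m A hm (min (s + 1) m) le_rfl
  apply List.ext_getElem (by rw [hlenF, hblen])
  intro i h1 h2
  have hiA : i < A.length := by omega
  rw [← List.getD_eq_getElem _ 0 h1, ← List.getD_eq_getElem _ 0 h2]
  rw [hbchar i hiA]
  by_cases him : i < m
  · have hc : i % (s + 1) < s + 1 := Nat.mod_lt _ (by omega)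
    have hcmin : i % (s + 1) < min (s + 1) m := by
      have := Nat.mod_le i (s + 1)
      omega
    rw [if_pos ⟨him, hcmin⟩, ← hsorted_class _ hc]
    have hmd := Nat.mod_add_div i (s + 1)
    have e : i % (s + 1) + (i / (s + 1)) * (s + 1) = i := by
      have e2 : (i / (s + 1)) * (s + 1) = (s + 1) * (i / (s + 1)) := by ring
      omega
    rw [pv_gather_getD F s m (i / (s + 1)) (i % (s + 1)) (by omega), e]
  · rw [if_neg (fun h => him h.1)]
    exact hinv.2.1 i (by omega)

-- degenerate cases of A's loop: empty range (n ≤ k) and gap 0 (k = 0)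
theorem pv_pass_g0 (m : Nat) (L : List Int) : pvPass 0 m L = (L, true) := by
  have H : ∀ (l : List Nat) (st : List Int × Bool), l.foldl (pvSwapStep 0) st = st := by
    intro l
    induction l with
    | nil => intro st; rfl
    | cons i l ih =>
      intro st
      rw [List.foldl_cons]
      have hstep : pvSwapStep 0 st i = st := by
        unfold pvSwapStep
        rw [if_neg (by
          rintro ⟨-, h2⟩
          have h2' : st.1.getD i 0 < st.1.getD i 0 := h2
          exact lt_irrefl _ h2')]
      rw [hstep, ih]
  exact H _ _

theorem pv_loop_m0 (g : Nat) (L : List Int) : pvLoop g 0 L = L := by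
  rw [pvLoop]
  have h : pvPass g 0 L = (L, true) := rfl
  simp [h]

theorem pv_loop_g0 (m : Nat) (L : List Int) : pvLoop 0 m L = L := by
  rw [pvLoop]
  simp [pv_pass_g0]

-- ===== VERDICT (by name: the statement is the Claim_ definition above) =====
theorem pugalo_sort_spec : Claim_equal_pugalo_sort := by
  unfold Claim_equal_pugalo_sort Spec_pugalo_sort Pre_pugalo_sort
  intro A n k hDom hPre
  show (let F := pvLoop k.toNat (n - k).toNat A
        if F = PySem.List.sorted F (fun x => x) false then "ДА" else "НЕТ") =
    (let A' := if 1 ≤ k then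
        (List.range (min k.toNat (min (max n 0).toNat A.length))).foldl
          (fun L c => pvScatter L (k.toNat - 1) c
            (PySem.List.sorted (pvGather L (k.toNat - 1) c (min (max n 0).toNat A.length)) (fun x => x) false)) A
      else A
     if A' = PySem.List.sorted A' (fun x => x) false then "ДА" else "НЕТ")
  by_cases hk : 1 ≤ k
  · obtain ⟨s, hs⟩ : ∃ s, k.toNat = s + 1 := ⟨k.toNat - 1, by omega⟩
    have hm : min (max n 0).toNat A.length ≤ A.length := Nat.min_le_right _ _
    have hmn : (n - k).toNat = min (max n 0).toNat A.length - (s + 1) := by omega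
    simp only [if_pos hk, hs, hmn, Nat.add_sub_cancel]
    rw [pv_main s (min (max n 0).toNat A.length) A hm]
  · have hloop : pvLoop k.toNat (n - k).toNat A = A := by
      rcases hPre with hnk | ⟨hk0, hlen⟩
      · have h0 : (n - k).toNat = 0 := by omega
        rw [h0, pv_loop_m0]
      · have h0 : k = 0 := by omega
        rw [h0]
        exact pv_loop_g0 _ _
    simp only [if_neg hk, hloop]
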